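-- pv_equiv track=rewrite | github.com/allyoushawn/paper_reading_repo | literature-survey/proxy-label-learning/read-papers/_phase37_reverse_citations.py | context_for_position
-- ===== SOURCE A (Python) =====
-- def context_for_position(segments: list[tuple[str, str]], pos: int) -> str:
--     """Map index inside joined segments back to segment label."""
--     if not segments:
--         return "Main note body"
--     if len(segments) == 1:
--         return segments[0][0]
--     off = 0
--     sep_len = 2  # \n\n between segments
--     for i, (label, seg) in enumerate(segments):
--         chunk_len = len(seg)
--         if pos < off + chunk_len:
--             return label
--         off += chunk_len
--         if i < len(segments) - 1:
--             off += sep_len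
--     return segments[-1][0]
-- ===== SOURCE B (Python) =====
-- def context_for_position(segments: list[tuple[str, str]], pos: int) -> str:
--     """Map index inside joined segments back to segment label."""
--     if not segments:
--         return "Main note body"
--     # boundary table: ends[i] = end position of segment i's content in the join
--     ends = []
--     off = 0
--     for _, seg in segments:
--         off += len(seg)
--         ends.append(off)
--         off += 2  # "\n\n" separator
--     # binary search: first i with pos < ends[i]  (bisect_right by hand)
--     lo, hi = 0, len(ends)
--     while lo < hi:
--         mid = (lo + hi) // 2
--         if ends[mid] <= pos:
--             lo = mid + 1
--         else:
--             hi = mid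
--     return segments[lo][0] if lo < len(segments) else segments[-1][0]
-- ===== Notes on version B (the rewrite author's own statement) =====
-- stated objective: alternative
-- what changed: Replaces the enumerate-based early-return scan with a precomputed list of cumulative segment-end boundaries followed by a hand-written bisect_right binary search over that table.
import Mathlib
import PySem

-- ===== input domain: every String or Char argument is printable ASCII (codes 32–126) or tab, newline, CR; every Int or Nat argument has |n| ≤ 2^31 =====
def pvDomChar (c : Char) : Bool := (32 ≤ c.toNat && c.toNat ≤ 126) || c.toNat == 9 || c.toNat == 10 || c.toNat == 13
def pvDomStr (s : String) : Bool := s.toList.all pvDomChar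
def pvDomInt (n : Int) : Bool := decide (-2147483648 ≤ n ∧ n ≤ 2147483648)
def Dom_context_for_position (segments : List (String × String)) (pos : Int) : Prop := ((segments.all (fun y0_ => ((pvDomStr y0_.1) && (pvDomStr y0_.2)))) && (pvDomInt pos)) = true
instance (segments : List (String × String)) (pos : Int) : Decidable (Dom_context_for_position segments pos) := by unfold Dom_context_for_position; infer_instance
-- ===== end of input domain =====

-- B replaces A's enumerate-based early-return scan by a precomputed boundary table + binary search (alternative decomposition, same result).


-- ===== PORT A =====
-- A's for-loop over enumerate(segments): early return when pos < off + len(seg),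
-- otherwise off += len(seg) (+2 unless last); lastLabel carries segments[-1][0] for the fall-through.
def ctxLoopA (pos : Int) : List (String × String) → Int → String → String
  | [], _, lastLabel => lastLabel
  | (label, seg) :: rest, off, _ =>
    let chunkLen := PySem.Str.len seg
    if pos < off + chunkLen then label
    else ctxLoopA pos rest (off + chunkLen + (if rest = [] then 0 else 2)) label

def context_for_position (segments : List (String × String)) (pos : Int) : String :=
  if segments = [] then "Main note body"
  else if segments.length = 1 then (segments.headD ("", "")).1
  else ctxLoopA pos segments 0 ""

-- ===== PORT B =====
-- first loop of B: ends.append(off + len(seg)); off += len(seg) + 2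
def endsOf : List (String × String) → Int → List Int
  | [], _ => []
  | (_, seg) :: rest, off =>
    let off' := off + PySem.Str.len seg
    off' :: endsOf rest (off' + 2)

-- B's while-loop: hand-written bisect_right on ends.
-- lo, hi, mid stay in 0..len(ends), so Nat with '/' matches Python's int with '//' exactly here,
-- and ends[mid] is always in range, so getD's default is never used.
def bsearch (ends : List Int) (pos : Int) (lo hi : Nat) : Nat :=
  if _h : lo < hi then
    let mid := (lo + hi) / 2
    if ends.getD mid 0 ≤ pos then bsearch ends pos (mid + 1) hi
    else bsearch ends pos lo mid
  else lo
termination_by hi - lo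
decreasing_by all_goals omega

def context_for_position_alt (segments : List (String × String)) (pos : Int) : String :=
  if segments = [] then "Main note body"
  else
    let ends := endsOf segments 0
    let lo := bsearch ends pos 0 ends.length
    if lo < segments.length then (segments.getD lo ("", "")).1
    else ((segments.getLast?).getD ("", "")).1

-- ===== PRECONDITION & SPEC =====
def Spec_context_for_position (segments : List (String × String)) (pos : Int) (out : String) : Prop := out = context_for_position_alt segments pos
instance (segments : List (String × String)) (pos : Int) (out : String) : Decidable (Spec_context_for_position segments pos out) := by unfold Spec_context_for_position; infer_instance

-- ===== CLAIM (what is proved, stated in full; the proofs are below) =====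
def Claim_equal_context_for_position : Prop := ∀ (segments : List (String × String)) (pos : Int), Dom_context_for_position segments pos → Spec_context_for_position segments pos (context_for_position segments pos)

-- ===== LEMMAS AND PROOFS =====

-- label selected at index k: segments[k][0] if k < len else segments[-1][0] (lastLabel if empty)
def labelAt (segments : List (String × String)) (k : Nat) (lastLabel : String) : String :=
  if k < segments.length then (segments.getD k ("", "")).1
  else match segments.getLast? with
    | some p => p.1
    | none => lastLabel

-- A's loop returns the label at the first index where pos < (end boundary), else the last label.
theorem ctxLoopA_eq_labelAt (pos : Int) :
    ∀ (segs : List (String × String)) (off : Int) (lastLabel : String),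
    ctxLoopA pos segs off lastLabel =
      labelAt segs ((endsOf segs off).findIdx (fun e => pos < e)) lastLabel := by
  intro segs
  induction segs with
  | nil => intro off lastLabel; simp [ctxLoopA, endsOf, labelAt]
  | cons hd rest ih =>
    intro off lastLabel
    obtain ⟨label, seg⟩ := hd
    have hends : endsOf ((label, seg) :: rest) off
        = (off + PySem.Str.len seg) :: endsOf rest (off + PySem.Str.len seg + 2) := rfl
    by_cases hlt : pos < off + PySem.Str.len seg
    · have hL : ctxLoopA pos ((label, seg) :: rest) off lastLabel = label := by
        simp only [ctxLoopA]; rw [if_pos hlt]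
      have hidx : ((endsOf ((label, seg) :: rest) off).findIdx (fun e => pos < e)) = 0 := by
        rw [hends]
        simp only [List.findIdx_cons, decide_eq_true hlt, cond_true]
      rw [hL, hidx]
      simp [labelAt]
    · have hL : ctxLoopA pos ((label, seg) :: rest) off lastLabel
          = ctxLoopA pos rest (off + PySem.Str.len seg + (if rest = [] then 0 else 2)) label := by
        simp only [ctxLoopA]; rw [if_neg hlt]
      have hidx : ((endsOf ((label, seg) :: rest) off).findIdx (fun e => pos < e))
          = (endsOf rest (off + PySem.Str.len seg + 2)).findIdx (fun e => pos < e) + 1 := by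
        rw [hends]
        simp only [List.findIdx_cons, decide_eq_false hlt, cond_false]
      rw [hL, hidx]
      cases hr : rest with
      | nil =>
        subst hr
        simp [ctxLoopA, endsOf, labelAt]
      | cons r rs =>
        subst hr
        rw [if_neg (List.cons_ne_nil r rs), ih (off + PySem.Str.len seg + 2) label]
        unfold labelAt
        by_cases hkl : (endsOf (r :: rs) (off + PySem.Str.len seg + 2)).findIdx (fun e => pos < e) < (r :: rs).length
        · rw [if_pos hkl, if_pos (by simp only [List.length_cons] at hkl ⊢; omega)]
          rw [List.getD_cons_succ]
        · rw [if_neg hkl, if_neg (by simp only [List.length_cons] at hkl ⊢; omega)]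
          rw [List.getLast?_cons_cons]
          cases hlast : (r :: rs).getLast? with
          | none => simp at hlast
          | some p => rfl

-- every entry of endsOf segs off is ≥ off
theorem endsOf_ge (segs : List (String × String)) :
    ∀ (off : Int) (e : Int), e ∈ endsOf segs off → off ≤ e := by
  induction segs with
  | nil => intro off e he; simp [endsOf] at he
  | cons hd rest ih =>
    intro off e he
    obtain ⟨label, seg⟩ := hd
    have hlen : 0 ≤ PySem.Str.len seg := by simp [PySem.Str.len_eq]
    simp only [endsOf, List.mem_cons] at he
    rcases he with rfl | he
    · omega
    · have := ih (off + PySem.Str.len seg + 2) e he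
      omega

theorem endsOf_sorted (segs : List (String × String)) :
    ∀ (off : Int), (endsOf segs off).Pairwise (· ≤ ·) := by
  induction segs with
  | nil => intro off; simp [endsOf]
  | cons hd rest ih =>
    intro off
    obtain ⟨label, seg⟩ := hd
    simp only [endsOf]
    refine List.Pairwise.cons ?_ (ih _)
    intro e he
    have := endsOf_ge rest _ e he
    omega

-- sortedness in getD form
theorem sorted_getD (ends : List Int) (hs : ends.Pairwise (· ≤ ·))
    (i j : Nat) (hij : i ≤ j) (hj : j < ends.length) :
    ends.getD i 0 ≤ ends.getD j 0 := by
  rcases Nat.eq_or_lt_of_le hij with rfl | hlt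
  · exact le_refl _
  · have hi : i < ends.length := Nat.lt_trans hlt hj
    rw [List.getD_eq_getElem _ _ hi, List.getD_eq_getElem _ _ hj]
    exact (List.pairwise_iff_getElem.mp hs) i j hi hj hlt

-- characterize findIdx from pointwise facts
theorem findIdx_eq_of (ends : List Int) (pos : Int) (k : Nat)
    (hk : k ≤ ends.length)
    (hlow : ∀ i, i < k → ends.getD i 0 ≤ pos)
    (hhigh : ∀ i, k ≤ i → i < ends.length → pos < ends.getD i 0) :
    ends.findIdx (fun e => pos < e) = k := by
  induction ends generalizing k with
  | nil =>
    simp only [List.length_nil, Nat.le_zero] at hk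
    subst hk
    simp [List.findIdx_nil]
  | cons e rest ih =>
    cases k with
    | zero =>
      have h0 : pos < e := by
        have := hhigh 0 (Nat.zero_le _) (by simp)
        simpa using this
      simp [List.findIdx_cons, h0]
    | succ k' =>
      have h0 : ¬ pos < e := by
        have := hlow 0 (Nat.succ_pos _)
        simp at this; omega
      simp only [List.findIdx_cons, decide_eq_false h0, cond_false]
      have : rest.findIdx (fun e => pos < e) = k' := by
        refine ih k' (by simpa using hk) ?_ ?_
        · intro i hi
          have := hlow (i + 1) (Nat.succ_lt_succ hi)
          simpa using this
        · intro i hi hil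
          have := hhigh (i + 1) (Nat.succ_le_succ hi) (by simpa using Nat.succ_lt_succ hil)
          simpa using this
      omega

-- bsearch computes bisect_right = findIdx (pos < ·) on a sorted list
theorem bsearch_eq_findIdx (ends : List Int) (pos : Int) (hs : ends.Pairwise (· ≤ ·)) :
    ∀ (n lo hi : Nat), hi - lo = n → lo ≤ hi → hi ≤ ends.length →
    (∀ i, i < lo → ends.getD i 0 ≤ pos) →
    (∀ i, hi ≤ i → i < ends.length → pos < ends.getD i 0) →
    bsearch ends pos lo hi = ends.findIdx (fun e => pos < e) := by
  intro n
  induction n using Nat.strong_induction_on with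
  | _ n ih =>
    intro lo hi hn hle hhi hlow hhigh
    by_cases h : lo < hi
    · rw [bsearch, dif_pos h]
      set mid := (lo + hi) / 2 with hmid
      have hmlo : lo ≤ mid := by omega
      have hmhi : mid < hi := by omega
      have hmlen : mid < ends.length := by omega
      by_cases hc : ends.getD mid 0 ≤ pos
      · rw [if_pos hc]
        refine ih (hi - (mid + 1)) (by omega) (mid + 1) hi rfl (by omega) hhi ?_ hhigh
        intro i hi'
        rcases Nat.lt_or_ge i lo with h' | h'
        · exact hlow i h'
        · exact le_trans (sorted_getD ends hs i mid (by omega) hmlen) hc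
      · rw [if_neg hc]
        refine ih (mid - lo) (by omega) lo mid rfl hmlo (by omega) hlow ?_
        intro i hi' hil
        have : ends.getD mid 0 ≤ ends.getD i 0 := sorted_getD ends hs mid i hi' hil
        omega
    · rw [bsearch, dif_neg h]
      have hlohi : lo = hi := by omega
      subst hlohi
      exact (findIdx_eq_of ends pos lo hhi hlow hhigh).symm

-- ===== VERDICT (by name: the statement is the Claim_ definition above) =====
theorem context_for_position_spec : Claim_equal_context_for_position := by
  intro segments pos _
  unfold Spec_context_for_position context_for_position context_for_position_alt
  by_cases hne : segments = []
  · simp [hne]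
  · rw [if_neg hne, if_neg hne]
    have hbs : bsearch (endsOf segments 0) pos 0 (endsOf segments 0).length
        = (endsOf segments 0).findIdx (fun e => pos < e) := by
      refine bsearch_eq_findIdx _ pos (endsOf_sorted segments 0) _ 0 _ rfl (Nat.zero_le _) (le_refl _) ?_ ?_
      · intro i hi; omega
      · intro i hi hil; omega
    simp only [hbs]
    have halt : (if (endsOf segments 0).findIdx (fun e => pos < e) < segments.length
          then (segments.getD ((endsOf segments 0).findIdx (fun e => pos < e)) ("", "")).1
          else ((segments.getLast?).getD ("", "")).1)
        = labelAt segments ((endsOf segments 0).findIdx (fun e => pos < e)) "" := by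
      unfold labelAt
      by_cases hkl : (endsOf segments 0).findIdx (fun e => pos < e) < segments.length
      · rw [if_pos hkl, if_pos hkl]
      · rw [if_neg hkl, if_neg hkl]
        cases hlast : segments.getLast? with
        | none => exact absurd (List.getLast?_eq_none_iff.mp hlast) hne
        | some p => rfl
    rw [halt]
    by_cases hone : segments.length = 1
    · rw [if_pos hone]
      obtain ⟨q, rfl⟩ := List.length_eq_one_iff.mp hone
      obtain ⟨l, s⟩ := q
      have hends1 : endsOf [(l, s)] 0 = [0 + PySem.Str.len s] := rfl
      by_cases hp : pos < 0 + PySem.Str.len s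
      · have : (endsOf [(l, s)] 0).findIdx (fun e => pos < e) = 0 := by
          rw [hends1]
          simp only [List.findIdx_cons, decide_eq_true hp, cond_true]
        rw [this]
        simp [labelAt]
      · have : (endsOf [(l, s)] 0).findIdx (fun e => pos < e) = 1 := by
          rw [hends1]
          simp only [List.findIdx_cons, decide_eq_false hp, cond_false, List.findIdx_nil]
        rw [this]
        simp [labelAt]
    · rw [if_neg hone]
      exact ctxLoopA_eq_labelAt pos segments 0 ""
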